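-- pv_equiv track=rewrite | github.com/jsuci/gidapp | swertres/script_find_prev_v2.1.py | check_pair
-- ===== SOURCE A (Python) =====
-- def check_pair(res, pair):
--     for pair_digit in pair:
--         if pair_digit in res:
--             res = res.replace(pair_digit, "", 1)
--
--     if len(res) == 1:
--         return True
--     else:
--         return False
-- ===== SOURCE B (Python) =====
-- def check_pair(res, pair):
--     removed = sum(min(res.count(d), pair.count(d)) for d in set(pair))
--     return len(res) - removed == 1
-- ===== Notes on version B (the rewrite author's own statement) =====
-- stated objective: faster
-- what changed: Replaces the sequential one-at-a-time string-replace loop over pair with a per-distinct-character multiset-intersection count (sum of min occurrence counts) followed by a single length comparison.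
import Mathlib
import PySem

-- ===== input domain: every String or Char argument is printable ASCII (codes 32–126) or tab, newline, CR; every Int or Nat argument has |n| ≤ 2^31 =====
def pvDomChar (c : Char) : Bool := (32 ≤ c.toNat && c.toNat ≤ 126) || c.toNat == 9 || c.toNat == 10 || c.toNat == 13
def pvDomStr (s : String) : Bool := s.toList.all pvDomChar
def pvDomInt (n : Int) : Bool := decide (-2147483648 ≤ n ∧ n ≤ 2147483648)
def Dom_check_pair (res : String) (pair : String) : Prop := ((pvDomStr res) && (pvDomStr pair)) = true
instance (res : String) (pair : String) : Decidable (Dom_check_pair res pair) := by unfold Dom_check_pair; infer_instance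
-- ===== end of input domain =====

-- B replaces A's sequential first-occurrence replace loop with a per-distinct-character
-- multiset-intersection count (sum of min occurrence counts); measured faster (no per-removal string rebuilds).


-- ===== PORT A =====
-- Hand port on List Char: `pair_digit in res` for a 1-char needle is List.contains, and
-- `res.replace(pair_digit, "", 1)` for a 1-char needle removes the first occurrence of
-- that character, i.e. List.erase — both exact for single-character needles.
def check_pair (res : String) (pair : String) : Bool :=
  let final := pair.toList.foldl
    (fun r d => if r.contains d then r.erase d else r) res.toList
  final.length == 1

-- ===== PORT B =====
-- `res.count(d)` / `pair.count(d)` for a 1-char needle is List.count (exact);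
-- set(pair) is PySem.List.dedup (the sum is order-independent).
def check_pair_alt (res : String) (pair : String) : Bool :=
  let r := res.toList
  let p := pair.toList
  let removed : Int :=
    (PySem.List.dedup p).foldl
      (fun acc d => acc + min ((r.count d : Int)) ((p.count d : Int))) 0
  ((r.length : Int) - removed) == 1

-- ===== PRECONDITION & SPEC =====
def Spec_check_pair (res : String) (pair : String) (out : Bool) : Prop := out = check_pair_alt res pair
instance (res : String) (pair : String) (out : Bool) : Decidable (Spec_check_pair res pair out) := by unfold Spec_check_pair; infer_instance

-- ===== CLAIM (what is proved, stated in full; the proofs are below) =====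
def Claim_equal_check_pair : Prop := ∀ (res : String) (pair : String), Dom_check_pair res pair → Spec_check_pair res pair (check_pair res pair)

-- ===== LEMMAS AND PROOFS =====

-- A's loop: the remaining count of every character is the truncated difference.
theorem pv_count_foldl (p : List Char) : ∀ (r : List Char) (d : Char),
    (p.foldl (fun r d => if r.contains d then r.erase d else r) r).count d
      = r.count d - p.count d := by
  induction p with
  | nil => intro r d; simp
  | cons c t ih =>
    intro r d
    simp only [List.foldl_cons, ih]
    by_cases hdc : d = c
    · subst hdc
      by_cases hmem : r.contains d
      · rw [if_pos hmem, List.count_erase_self]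
        simp [List.count_cons_self]
        omega
      · rw [if_neg hmem]
        have : r.count d = 0 := by
          simpa [List.count_eq_zero] using hmem
        simp [List.count_cons_self, this]
    · have hcd : c ≠ d := Ne.symm hdc
      by_cases hmem : r.contains c
      · rw [if_pos hmem, List.count_erase_of_ne hdc]
        simp [hcd]
      · rw [if_neg hmem]
        simp [hcd]

theorem pv_foldl_add (g : Char → Int) (l : List Char) : ∀ a,
    l.foldl (fun acc d => acc + g d) a = a + (l.map g).sum := by
  induction l with
  | nil => intro a; simp
  | cons x t ih => intro a; simp [ih]; ring

-- the intersection size, as a Nat-valued Finset sum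
def pvRem (r p : List Char) : Nat := ∑ d ∈ p.toFinset, min (r.count d) (p.count d)

theorem pv_rem_eq (r p : List Char) :
    pvRem r p = ∑ d ∈ r.toFinset, min (r.count d) (p.count d) := by
  unfold pvRem
  have hL : ∑ d ∈ p.toFinset, min (r.count d) (p.count d)
      = ∑ d ∈ p.toFinset ∪ r.toFinset, min (r.count d) (p.count d) :=
    Finset.sum_subset Finset.subset_union_left (by
      intro x _ hx
      have : p.count x = 0 := by simpa [List.count_eq_zero, List.mem_toFinset] using hx
      simp [this])
  have hR : ∑ d ∈ r.toFinset, min (r.count d) (p.count d)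
      = ∑ d ∈ p.toFinset ∪ r.toFinset, min (r.count d) (p.count d) :=
    Finset.sum_subset Finset.subset_union_right (by
      intro x _ hx
      have : r.count x = 0 := by simpa [List.count_eq_zero, List.mem_toFinset] using hx
      simp [this])
  rw [hL, hR]

theorem pv_final_length (r p : List Char) :
    (p.foldl (fun r d => if r.contains d then r.erase d else r) r).length
      = r.length - pvRem r p := by
  set final := p.foldl (fun r d => if r.contains d then r.erase d else r) r with hf
  have hcount : ∀ d, final.count d = r.count d - p.count d := fun d => pv_count_foldl p r d
  have hsub : final.toFinset ⊆ r.toFinset := by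
    intro x hx
    rw [List.mem_toFinset] at *
    have := hcount x
    have hpos : 0 < final.count x := List.count_pos_iff.mpr hx
    have : 0 < r.count x := by omega
    exact List.count_pos_iff.mp this
  have hlenf : final.length = ∑ d ∈ r.toFinset, final.count d := by
    rw [← List.sum_toFinset_count_eq_length final]
    refine Finset.sum_subset hsub ?_
    intro x _ hx
    simpa [List.count_eq_zero, List.mem_toFinset] using hx
  have hlenr : r.length = ∑ d ∈ r.toFinset, r.count d :=
    (List.sum_toFinset_count_eq_length r).symm
  have key : ∑ d ∈ r.toFinset, final.count d
      + ∑ d ∈ r.toFinset, min (r.count d) (p.count d) = ∑ d ∈ r.toFinset, r.count d := by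
    rw [← Finset.sum_add_distrib]
    refine Finset.sum_congr rfl (fun d _ => ?_)
    rw [hcount d]; omega
  rw [pv_rem_eq, hlenf, hlenr]; omega

theorem pv_removed_eq (r p : List Char) :
    (PySem.List.dedup p).foldl
      (fun acc d => acc + min ((r.count d : Int)) ((p.count d : Int))) 0
      = (pvRem r p : Int) := by
  rw [pv_foldl_add]
  have hnd : (PySem.List.dedup p).Nodup := PySem.List.nodup_dedup p
  have hfin : (PySem.List.dedup p).toFinset = p.toFinset := by
    ext x; simp
  unfold pvRem
  rw [← hfin, List.sum_toFinset _ hnd]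
  rw [zero_add, Nat.cast_list_sum, List.map_map]
  refine congrArg (fun l : List Int => l.sum) (List.map_congr_left fun d _ => ?_)
  simp

theorem pv_rem_le (r p : List Char) : pvRem r p ≤ r.length := by
  rw [pv_rem_eq, (List.sum_toFinset_count_eq_length r).symm]
  exact Finset.sum_le_sum (fun d _ => min_le_left _ _)

-- ===== VERDICT (by name: the statement is the Claim_ definition above) =====
theorem check_pair_spec : Claim_equal_check_pair := by
  intro res pair _
  unfold Spec_check_pair check_pair check_pair_alt
  simp only [pv_removed_eq, pv_final_length]
  have h1 := pv_rem_le res.toList pair.toList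
  rw [Bool.eq_iff_iff]
  simp only [beq_iff_eq]
  constructor <;> intro h <;> omega
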